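-- pv_equiv track=rewrite | github.com/TauWu/backend_learning_notes | 计算机基础/数据结构/代码/kmp.py | get_next
-- ===== SOURCE A (Python) =====
-- def get_next(str_s):
--     for ids in range(1, len(str_s)):
--         idp = 0
--         for p in str_s:
--             if str_s[-ids-idp] == p:
--                 idp -= 1
--                 if ids+idp == 0:
--                     yield len(str_s) - ids
--                 continue
--             break
--     yield 1
-- ===== SOURCE B (Python) =====
-- def get_next(str_s):
--     # For each border length b (prefix of length b == suffix of length b),
--     # in increasing b, yield n - b; finally yield 1.
--     n = len(str_s)
--     for b in range(1, n):
--         if str_s[:b] == str_s[n - b:]: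
--             yield n - b
--     yield 1
-- ===== Notes on version B (the rewrite author's own statement) =====
-- stated objective: simpler
-- what changed: A's nested character-scan state machine with negative-index arithmetic, mid-loop yield and break/continue is replaced by a single loop over candidate border lengths b that tests prefix/suffix equality with one slice comparison per b.
import Mathlib
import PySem

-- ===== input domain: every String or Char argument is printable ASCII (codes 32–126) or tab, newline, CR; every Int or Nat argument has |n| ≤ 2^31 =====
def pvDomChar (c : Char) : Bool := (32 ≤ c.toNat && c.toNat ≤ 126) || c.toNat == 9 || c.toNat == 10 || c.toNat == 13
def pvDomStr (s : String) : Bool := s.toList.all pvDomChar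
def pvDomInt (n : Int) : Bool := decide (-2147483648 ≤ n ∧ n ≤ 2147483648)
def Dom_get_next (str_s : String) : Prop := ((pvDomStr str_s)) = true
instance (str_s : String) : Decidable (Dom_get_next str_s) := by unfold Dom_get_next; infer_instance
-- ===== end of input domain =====

-- B replaces A's nested character-scan state machine by a per-shift slice-equality test
-- (prefix b == suffix b), same outputs in the same order; objective: simpler.

-- ===== PORT A =====
-- inner 'for p in str_s' loop of A; state idp; yields collected into the result list.
-- The 'none' branch (IndexError) is unreachable on the loop states A produces
-- (the index -ids-idp always lies in [-(len-1), len-2]): A never raises.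
def pvGoA (l : List Char) (n ids : Int) : List Char → Int → List Int
  | [], _ => []
  | p :: rest, idp =>
    match PySem.List.pyGet? l (-ids - idp) with
    | some c =>
      if c = p then
        (if ids + (idp - 1) = 0 then [n - ids] else []) ++ pvGoA l n ids rest (idp - 1)
      else []
    | none => []

def get_next (str_s : String) : List Int :=
  let l := str_s.toList
  let n : Int := l.length
  ((PySem.List.pyRange 1 n 1).foldl (fun acc ids => acc ++ pvGoA l n ids l 0) []) ++ [1]

-- ===== PORT B =====
-- str_s[:b] and str_s[n-b:] with 0 ≤ b ≤ n are exactly List.take b / List.drop (n-b).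
def get_next_alt (str_s : String) : List Int :=
  let l := str_s.toList
  let n := l.length
  ((PySem.List.pyRange 1 (n : Int) 1).foldl
      (fun acc b => if l.take b.toNat = l.drop (n - b.toNat) then acc ++ [(n : Int) - b] else acc)
      []) ++ [1]

-- ===== PRECONDITION & SPEC =====
def Spec_get_next (str_s : String) (out : List Int) : Prop := out = get_next_alt str_s
instance (str_s : String) (out : List Int) : Decidable (Spec_get_next str_s out) := by unfold Spec_get_next; infer_instance

-- ===== CLAIM (what is proved, stated in full; the proofs are below) =====
def Claim_equal_get_next : Prop := ∀ (str_s : String), Dom_get_next str_s → Spec_get_next str_s (get_next str_s)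

-- ===== LEMMAS AND PROOFS =====

-- once ids + idp ≤ 0, the inner loop can never yield again
theorem pvGoA_nil (l : List Char) (n ids : Int) :
    ∀ (rest : List Char) (idp : Int), ids + idp ≤ 0 → pvGoA l n ids rest idp = [] := by
  intro rest
  induction rest with
  | nil => intro idp _; simp [pvGoA]
  | cons p rest ih =>
    intro idp h
    simp only [pvGoA]
    cases hg : PySem.List.pyGet? l (-ids - idp) with
    | none => rfl
    | some c =>
      by_cases hc : c = p
      · have hne : ¬ (ids + (idp - 1) = 0) := by omega
        simp [hc, hne, ih (idp - 1) (by omega)]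
      · simp [hc]

-- the inner loop, started k characters in (idp = -k), yields [n - ids] iff the
-- remaining positions j ∈ [k, ids) all satisfy s[j] = s[n - ids + j], else []
theorem pvGoA_drop (l : List Char) (ids : Nat) (h2 : ids < l.length)
    (k : Nat) (hk : k < ids) :
    pvGoA l (l.length : Int) (ids : Int) (l.drop k) (-(k : Int)) =
      (if (∀ j, j < ids → k ≤ j → l[j]? = l[l.length - ids + j]?)
        then [((l.length : Int) - (ids : Int))] else []) := by
  have hkl : k < l.length := hk.trans h2
  have hmem : l.length - ids + k < l.length := by omega
  rw [List.drop_eq_getElem_cons hkl]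
  simp only [pvGoA]
  have hidx : -(ids : Int) - -(k : Int) = -(((ids - k : Nat)) : Int) := by omega
  rw [hidx, PySem.List.pyGet?_neg_natCast l (ids - k) (by omega) (by omega)]
  have hsh : l.length - (ids - k) = l.length - ids + k := by omega
  rw [hsh, List.getElem?_eq_getElem hmem]
  by_cases hc : l[l.length - ids + k]'hmem = l[k]'hkl
  · simp only [if_pos hc]
    by_cases hlast : k + 1 = ids
    · have hz : (ids : Int) + (-(k : Int) - 1) = 0 := by omega
      rw [if_pos hz, pvGoA_nil l _ _ _ _ (by omega)]
      rw [if_pos ?_]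
      · simp
      · intro j hj1 hj2
        have hjk : j = k := by omega
        subst hjk
        rw [List.getElem?_eq_getElem hkl, List.getElem?_eq_getElem hmem, hc]
    · have hz : ¬ ((ids : Int) + (-(k : Int) - 1) = 0) := by omega
      rw [if_neg hz]
      have hcast : -(k : Int) - 1 = -(((k + 1 : Nat)) : Int) := by omega
      rw [hcast, pvGoA_drop l ids h2 (k + 1) (by omega)]
      have hiff : (∀ j, j < ids → k + 1 ≤ j → l[j]? = l[l.length - ids + j]?) ↔
          (∀ j, j < ids → k ≤ j → l[j]? = l[l.length - ids + j]?) := by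
        constructor
        · intro h j hj1 hj2
          rcases Nat.eq_or_lt_of_le hj2 with heq | hlt
          · subst heq
            rw [List.getElem?_eq_getElem hkl, List.getElem?_eq_getElem hmem, hc]
          · exact h j hj1 hlt
        · intro h j hj1 hj2
          exact h j hj1 (by omega)
      rw [if_congr hiff rfl rfl]
      simp
  · simp only [if_neg hc]
    rw [if_neg ?_]
    intro hcond
    have := hcond k hk le_rfl
    rw [List.getElem?_eq_getElem hkl, List.getElem?_eq_getElem hmem] at this
    exact hc (Option.some.inj this).symm
termination_by ids - k

theorem take_eq_drop_iff (l : List Char) (k : Nat) (hk : k ≤ l.length) :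
    (l.take k = l.drop (l.length - k)) ↔ (∀ j, j < k → l[j]? = l[l.length - k + j]?) := by
  constructor
  · intro h j hj
    have h1 : (l.take k)[j]? = l[j]? := List.getElem?_take_of_lt hj
    have h2 : (l.drop (l.length - k))[j]? = l[l.length - k + j]? := List.getElem?_drop ..
    rw [← h1, h, h2]
  · intro h
    apply List.ext_getElem?
    intro j
    by_cases hj : j < k
    · rw [List.getElem?_take_of_lt hj, List.getElem?_drop, ← h j hj]
    · rw [List.getElem?_drop]
      have h1 : (l.take k)[j]? = none := by
        apply List.getElem?_eq_none; simp; omega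
      have h2 : l[l.length - k + j]? = none := by
        apply List.getElem?_eq_none; omega
      rw [h1, h2]

-- ===== VERDICT (by name: the statement is the Claim_ definition above) =====
theorem get_next_spec : Claim_equal_get_next := by
  intro s _
  unfold Spec_get_next get_next get_next_alt
  simp only []
  congr 1
  apply PySem.List.foldl_congr_mem
  intro acc ids hmem
  rw [PySem.List.mem_pyRange_one] at hmem
  obtain ⟨h1, h2⟩ := hmem
  set l := s.toList with hl
  have hids : ids = ((ids.toNat : Nat) : Int) := (Int.toNat_of_nonneg (by omega)).symm
  set k := ids.toNat with hkdef
  have hk1 : 1 ≤ k := by omega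
  have hk2 : k < l.length := by omega
  rw [hids]
  have hgo := pvGoA_drop l k hk2 0 (by omega)
  simp only [List.drop_zero, Nat.cast_zero, neg_zero] at hgo
  rw [hgo]
  have hcond : (∀ j, j < k → 0 ≤ j → l[j]? = l[l.length - k + j]?) ↔
      (l.take k = l.drop (l.length - k)) := by
    rw [take_eq_drop_iff l k (by omega)]
    exact ⟨fun h j hj => h j hj (Nat.zero_le j), fun h j hj _ => h j hj⟩
  rw [if_congr hcond rfl rfl]
  split_ifs <;> simp
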